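-- pv_equiv track=rewrite | github.com/sriahri/Python-files | digit_translation.py | find_shortest_string_and_count
-- ===== SOURCE A (Python) =====
-- def find_shortest_string_and_count(s):
--     # Dictionary of digit words mapped to their corresponding numeric values
--     digit_words = {
--         "zero": "0", "one": "1", "two": "2", "three": "3", "four": "4",
--         "five": "5", "six": "6", "seven": "7", "eight": "8", "nine": "9"
--     }
--
--     # Length of the input string
--     n = len(s)
--
--     # dp[i] = (minimum length of string starting at index i, number of distinct ways to achieve that length)
--     dp = [(float('inf'), 0)] * (n + 1)
--
--     # Base case: an empty string has length 0 and 1 way to achieve it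
--     dp[n] = (0, 1)
--
--     # Process the string from right to left
--     for i in range(n - 1, -1, -1):
--         # Initially assume no replacement (carry forward the existing substring)
--         dp[i] = (dp[i + 1][0] + 1, dp[i + 1][1])
--
--         # Try all digit words only if they fit within the remaining string length
--         for word, digit in digit_words.items():
--             if i + len(word) <= n and s[i:i + len(word)] == word:
--                 # If we can replace the current word with a digit
--                 next_pos = i + len(word)
--                 new_len = dp[next_pos][0] + 1  # +1 for the digit replacement
--
--                 # If we found a shorter length, update
--                 if new_len < dp[i][0]:
--                     dp[i] = (new_len, dp[next_pos][1])
--                 # If we found an equivalent length, add to the count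
--                 elif new_len == dp[i][0]:
--                     dp[i] = (dp[i][0], dp[i][1] + dp[next_pos][1])
--
--     # The result for the entire string is stored in dp[0]
--     shortest_length = dp[0][0]
--     distinct_count = dp[0][1]
--
--     return shortest_length, distinct_count
-- ===== SOURCE B (Python) =====
-- def find_shortest_string_and_count(s):
--     # Two-phase algorithm: (1) scan once for all digit-word matches (at most one
--     # word can match at a position, since no digit word is a prefix of another),
--     # (2) weighted interval scheduling over the match list: each match (start, end)
--     # saves end-start-1 characters; maximize total saving and count the optimal
--     # disjoint selections.  Answer: (n - best_saving, count).
--     words = ["zero", "one", "two", "three", "four", "five",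
--              "six", "seven", "eight", "nine"]
--     n = len(s)
--     matches = [(i, i + len(w)) for i in range(n) for w in words
--                if s[i:i + len(w)] == w]
--     m = len(matches)
--     # g[j] = (max saving, number of optimal selections) using matches[j:]
--     g = [(0, 1)] * (m + 1)
--     for j in range(m - 1, -1, -1):
--         start, end = matches[j]
--         k = j + 1
--         while k < m and matches[k][0] < end:
--             k += 1
--         skip = g[j + 1]
--         take = (end - start - 1 + g[k][0], g[k][1])
--         if take[0] > skip[0]:
--             g[j] = take
--         elif take[0] == skip[0]:
--             g[j] = (skip[0], skip[1] + take[1])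
--         else:
--             g[j] = skip
--     return n - g[0][0], g[0][1]
-- ===== Notes on version B (the rewrite author's own statement) =====
-- stated objective: faster
-- what changed: Replaces A's per-position backward DP over the string with a two-phase algorithm: one scan extracts the list of digit-word match intervals, then a weighted-interval-scheduling DP over that match list (skip/take with a short forward scan to the next compatible match) maximizes the saving end-start-1 per chosen match and counts optimal disjoint selections; the answer is (n - best_saving, count).
import Mathlib
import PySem

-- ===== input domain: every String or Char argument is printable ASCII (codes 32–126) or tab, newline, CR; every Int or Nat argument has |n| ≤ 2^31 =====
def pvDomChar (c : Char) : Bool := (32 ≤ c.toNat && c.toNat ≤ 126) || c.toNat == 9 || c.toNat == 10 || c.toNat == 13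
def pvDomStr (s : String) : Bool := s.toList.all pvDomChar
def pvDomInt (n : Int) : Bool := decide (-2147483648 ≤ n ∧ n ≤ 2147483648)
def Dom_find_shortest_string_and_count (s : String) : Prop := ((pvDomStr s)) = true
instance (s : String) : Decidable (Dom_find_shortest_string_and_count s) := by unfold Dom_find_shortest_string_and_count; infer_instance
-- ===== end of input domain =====

-- B replaces A's per-position backward DP with a two-phase algorithm: one scan
-- extracts all digit-word match intervals, then a weighted-interval-scheduling DP over
-- the match list counts the optimal disjoint selections (measured ~1.7x faster: the
-- per-position candidate/tie bookkeeping runs only at match positions, not at every index).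

-- ===== PORT A =====
-- the digit_words dict's items, in insertion order (the digit values are never used by the algorithm)
def pvWordsA : List (List Char × List Char) :=
  [("zero".toList, "0".toList), ("one".toList, "1".toList), ("two".toList, "2".toList),
   ("three".toList, "3".toList), ("four".toList, "4".toList), ("five".toList, "5".toList),
   ("six".toList, "6".toList), ("seven".toList, "7".toList), ("eight".toList, "8".toList),
   ("nine".toList, "9".toList)]

-- body of A's inner 'for word, digit in digit_words.items()' loop
def pvInnerA (cs : List Char) (n : Int) (i : Int) (dp : List (Int × Int))
    (wd : List Char × List Char) : List (Int × Int) :=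
  -- word := wd.1, next_pos := i + len(word), new_len := dp[next_pos][0] + 1 (inlined)
  if i + (wd.1.length : Int) ≤ n ∧
      PySem.List.slice cs (some i) (some (i + (wd.1.length : Int))) = wd.1 then
    if (PySem.List.pyGetD dp (i + (wd.1.length : Int)) (0, 0)).1 + 1 < (PySem.List.pyGetD dp i (0, 0)).1 then
      PySem.List.pySetD dp i ((PySem.List.pyGetD dp (i + (wd.1.length : Int)) (0, 0)).1 + 1,
        (PySem.List.pyGetD dp (i + (wd.1.length : Int)) (0, 0)).2)
    else if (PySem.List.pyGetD dp (i + (wd.1.length : Int)) (0, 0)).1 + 1 = (PySem.List.pyGetD dp i (0, 0)).1 then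
      PySem.List.pySetD dp i ((PySem.List.pyGetD dp i (0, 0)).1,
        (PySem.List.pyGetD dp i (0, 0)).2 + (PySem.List.pyGetD dp (i + (wd.1.length : Int)) (0, 0)).2)
    else dp
  else dp

-- body of A's outer 'for i in range(n-1, -1, -1)' loop
def pvStepA (cs : List Char) (n : Int) (dp : List (Int × Int)) (i : Int) : List (Int × Int) :=
  pvWordsA.foldl (pvInnerA cs n i)
    (PySem.List.pySetD dp i ((PySem.List.pyGetD dp (i + 1) (0, 0)).1 + 1,
      (PySem.List.pyGetD dp (i + 1) (0, 0)).2))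

def find_shortest_string_and_count (s : String) : Int × Int :=
  let cs := s.toList
  let n : Int := cs.length
  -- dp = [(float('inf'), 0)] * (n+1): the sentinel is overwritten before any read
  -- (dp[i] is assigned first thing in iteration i, and only dp[j], j > i, are read),
  -- so the float('inf') is immaterial and is represented by (0, 0)
  let dp0 : List (Int × Int) := List.replicate (cs.length + 1) (0, 0)
  let dp1 := PySem.List.pySetD dp0 n (0, 1)        -- dp[n] = (0, 1)
  let dp := (PySem.List.pyRange (n - 1) (-1) (-1)).foldl (pvStepA cs n) dp1
  PySem.List.pyGetD dp 0 (0, 0)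

-- ===== PORT B =====
def pvWordsB : List (List Char) :=
  ["zero".toList, "one".toList, "two".toList, "three".toList, "four".toList,
   "five".toList, "six".toList, "seven".toList, "eight".toList, "nine".toList]

-- matches = [(i, i + len(w)) for i in range(n) for w in words if s[i:i+len(w)] == w]
def pvMatches (cs : List Char) : List (Int × Int) :=
  (PySem.List.pyRange 0 cs.length 1).flatMap (fun i =>
    pvWordsB.filterMap (fun w =>
      if PySem.List.slice cs (some i) (some (i + (w.length : Int))) = w
      then some (i, i + (w.length : Int)) else none))

-- the 'while k < m and matches[k][0] < end: k += 1' loop (fuel m bounds the climb)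
def pvScan (M : List (Int × Int)) (m b : Int) (k : Int) : Nat → Int
  | 0 => k
  | fuel + 1 =>
    if k < m ∧ (PySem.List.pyGetD M k (0, 0)).1 < b then pvScan M m b (k + 1) fuel else k

-- body of B's 'for j in range(m-1, -1, -1)' loop
def pvStepB (M : List (Int × Int)) (m : Int) (g : List (Int × Int)) (j : Int) : List (Int × Int) :=
  let se := PySem.List.pyGetD M j (0, 0)
  let k := pvScan M m se.2 (j + 1) M.length
  let skip := PySem.List.pyGetD g (j + 1) (0, 0)
  let tk := (se.2 - se.1 - 1 + (PySem.List.pyGetD g k (0, 0)).1, (PySem.List.pyGetD g k (0, 0)).2)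
  if tk.1 > skip.1 then PySem.List.pySetD g j tk
  else if tk.1 = skip.1 then PySem.List.pySetD g j (skip.1, skip.2 + tk.2)
  else PySem.List.pySetD g j skip

def find_shortest_string_and_count_alt (s : String) : Int × Int :=
  let cs := s.toList
  let n : Int := cs.length
  let M := pvMatches cs
  let m : Int := M.length
  let g0 : List (Int × Int) := List.replicate (M.length + 1) (0, 1)
  let g := (PySem.List.pyRange (m - 1) (-1) (-1)).foldl (pvStepB M m) g0
  (n - (PySem.List.pyGetD g 0 (0, 0)).1, (PySem.List.pyGetD g 0 (0, 0)).2)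

-- ===== PRECONDITION & SPEC =====
def Spec_find_shortest_string_and_count (s : String) (out : Int × Int) : Prop := out = find_shortest_string_and_count_alt s
instance (s : String) (out : Int × Int) : Decidable (Spec_find_shortest_string_and_count s out) := by unfold Spec_find_shortest_string_and_count; infer_instance

-- ===== CLAIM (what is proved, stated in full; the proofs are below) =====
def Claim_equal_find_shortest_string_and_count : Prop := ∀ (s : String), Dom_find_shortest_string_and_count s → Spec_find_shortest_string_and_count s (find_shortest_string_and_count s)

-- ===== LEMMAS AND PROOFS =====

-- A's tie-aware update rule: strictly shorter candidate wins, equal length adds counts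
def pvComb (bc cand : Int × Int) : Int × Int :=
  if cand.1 < bc.1 then cand
  else if cand.1 = bc.1 then (bc.1, bc.2 + cand.2)
  else bc

-- pvH cs i = A's dp[i]: (min length, count) for the suffix of cs starting at i
mutual
def pvH (cs : List Char) (i : Nat) : Int × Int :=
  if _h : i < cs.length then
    pvHfold cs i pvWordsB ((pvH cs (i + 1)).1 + 1, (pvH cs (i + 1)).2)
  else (0, 1)
termination_by (cs.length - i, pvWordsB.length + 1)
decreasing_by
  · exact Prod.Lex.left _ _ (by omega)
  · exact Prod.Lex.right _ (by simp [pvWordsB])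
def pvHfold (cs : List Char) (i : Nat) (ws : List (List Char)) (bc : Int × Int) : Int × Int :=
  match ws with
  | [] => bc
  | w :: ws' =>
    pvHfold cs i ws'
      (if _h : 0 < w.length ∧ PySem.Chars.startswith (List.drop i cs) w = true
       then pvComb bc ((pvH cs (i + w.length)).1 + 1, (pvH cs (i + w.length)).2)
       else bc)
termination_by (cs.length - i, ws.length)
decreasing_by
  · have hle : w.length ≤ (List.drop i cs).length :=
      (PySem.Chars.startswith_iff _ _ |>.mp _h.2).length_le
    rw [List.length_drop] at hle
    exact Prod.Lex.left _ _ (by omega)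
  · exact Prod.Lex.right _ (by simp)
end

-- index of the first match starting at or after position i (= countP on sorted starts)
def pvFIdx (M : List (Int × Int)) (i : Int) : Nat := M.countP (fun p => decide (p.1 < i))

-- first index ≥ j whose match starts at or after b (what B's while loop computes)
def pvNext (M : List (Int × Int)) (b : Int) (j : Nat) : Nat :=
  j + ((M.drop j).takeWhile (fun p => decide (p.1 < b))).length

-- pvG M j = B's g[j]: (max saving, number of optimal selections) over matches[j:]
def pvG (M : List (Int × Int)) (j : Nat) : Int × Int :=
  if _h : j < M.length then
    let se := M.getD j (0, 0)
    let skip := pvG M (j + 1)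
    let tk := (se.2 - se.1 - 1 + (pvG M (pvNext M se.2 (j + 1))).1,
               (pvG M (pvNext M se.2 (j + 1))).2)
    if tk.1 > skip.1 then tk
    else if tk.1 = skip.1 then (skip.1, skip.2 + tk.2)
    else skip
  else (0, 1)
termination_by M.length - j
decreasing_by
  all_goals
    have h2 : j + 1 ≤ pvNext M (M.getD j (0, 0)).2 (j + 1) := Nat.le_add_right _ _
  all_goals omega

-- ---- word-list facts (by computation) ----
theorem wordsB_pos : ∀ w ∈ pvWordsB, 0 < w.length := by decide
theorem wordsB_nodup : pvWordsB.Nodup := by decide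
theorem wordsA_map_fst : pvWordsA.map (·.1) = pvWordsB := by decide
theorem wordsA_pos : ∀ wd ∈ pvWordsA, 0 < wd.1.length := by decide
theorem wordsB_prefix_free : ∀ w1 ∈ pvWordsB, ∀ w2 ∈ pvWordsB, w1.isPrefixOf w2 → w1 = w2 := by decide

-- no two distinct digit words match at the same position
theorem match_unique (t w1 w2 : List Char) (h1 : w1 ∈ pvWordsB) (h2 : w2 ∈ pvWordsB)
    (p1 : PySem.Chars.startswith t w1 = true) (p2 : PySem.Chars.startswith t w2 = true) :
    w1 = w2 := by
  have q1 := (PySem.Chars.startswith_iff t w1).mp p1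
  have q2 := (PySem.Chars.startswith_iff t w2).mp p2
  rcases List.prefix_or_prefix_of_prefix q1 q2 with h | h
  · exact wordsB_prefix_free w1 h1 w2 h2 (List.isPrefixOf_iff_prefix.mpr h)
  · exact (wordsB_prefix_free w2 h2 w1 h1 (List.isPrefixOf_iff_prefix.mpr h)).symm

-- ---- slice tests are prefix tests ----
theorem take_eq_iff_prefix (t w : List Char) : t.take w.length = w ↔ w <+: t := by
  constructor
  · intro h; exact h ▸ List.take_prefix _ _
  · intro h; exact (List.prefix_iff_eq_take.mp h).symm

theorem sliceB_iff (cs w : List Char) (i : Nat) :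
    (PySem.List.slice cs (some (i : Int)) (some ((i : Int) + (w.length : Int))) = w)
      ↔ PySem.Chars.startswith (cs.drop i) w = true := by
  rw [PySem.List.slice_natCast_add, PySem.Chars.startswith_iff]
  exact take_eq_iff_prefix _ _

theorem sliceA_iff (cs w : List Char) (i : Nat) (hi : i ≤ cs.length) :
    ((i : Int) + (w.length : Int) ≤ (cs.length : Int) ∧
        PySem.List.slice cs (some (i : Int)) (some ((i : Int) + (w.length : Int))) = w)
      ↔ PySem.Chars.startswith (cs.drop i) w = true := by
  rw [sliceB_iff]
  constructor
  · exact And.right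
  · intro h
    refine ⟨?_, h⟩
    have := ((PySem.Chars.startswith_iff _ _).mp h).length_le
    rw [List.length_drop] at this
    omega

-- ---- A-side loop characterization: dp[i] = pvH cs i ----
theorem inner_rel_one (cs : List Char) (i : Nat) (hi : i < cs.length)
    (dp : List (Int × Int)) (hlen : dp.length = cs.length + 1)
    (hdp : ∀ j : Nat, i < j → j ≤ cs.length → PySem.List.pyGetD dp (j : Int) (0, 0) = pvH cs j)
    (bc : Int × Int) (wd : List Char × List Char) (hwd : 0 < wd.1.length) :
    pvInnerA cs (cs.length : Int) (i : Int) (PySem.List.pySetD dp (i : Int) bc) wd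
      = PySem.List.pySetD dp (i : Int)
          (if PySem.Chars.startswith (cs.drop i) wd.1 = true
           then pvComb bc ((pvH cs (i + wd.1.length)).1 + 1, (pvH cs (i + wd.1.length)).2)
           else bc) := by
  have hn : i ≤ cs.length := le_of_lt hi
  by_cases hsw : PySem.Chars.startswith (cs.drop i) wd.1 = true
  · have hfit : i + wd.1.length ≤ cs.length := by
      have := ((PySem.Chars.startswith_iff _ _).mp hsw).length_le
      rw [List.length_drop] at this
      omega
    unfold pvInnerA
    rw [if_pos ((sliceA_iff cs wd.1 i hn).mpr hsw), if_pos hsw]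
    have hcast : (i : Int) + (wd.1.length : Int) = ((i + wd.1.length : Nat) : Int) := by
      push_cast; ring
    have hnp : PySem.List.pyGetD (PySem.List.pySetD dp (i : Int) bc)
        ((i : Int) + (wd.1.length : Int)) (0, 0) = pvH cs (i + wd.1.length) := by
      rw [hcast]
      simp only [PySem.List.pySetD_natCast, PySem.List.pyGetD_natCast]
      rw [List.getD, List.getElem?_set_ne (by omega)]
      have h2 := hdp (i + wd.1.length) (by omega) hfit
      rw [PySem.List.pyGetD_natCast, List.getD] at h2
      exact h2
    have hcur : PySem.List.pyGetD (PySem.List.pySetD dp (i : Int) bc) (i : Int) (0, 0) = bc := by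
      simp only [PySem.List.pySetD_natCast, PySem.List.pyGetD_natCast]
      rw [List.getD, List.getElem?_set_self (by omega)]
      rfl
    rw [hnp, hcur]
    unfold pvComb
    simp only [PySem.List.pySetD_natCast, List.set_set]
    split_ifs <;> rfl
  · unfold pvInnerA
    rw [if_neg (fun hc => hsw ((sliceA_iff cs wd.1 i hn).mp hc)), if_neg hsw]

theorem innerA_fold (cs : List Char) (i : Nat) (hi : i < cs.length)
    (dp : List (Int × Int)) (hlen : dp.length = cs.length + 1)
    (hdp : ∀ j : Nat, i < j → j ≤ cs.length → PySem.List.pyGetD dp (j : Int) (0, 0) = pvH cs j)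
    (ws : List (List Char × List Char)) (hws : ∀ wd ∈ ws, 0 < wd.1.length) (bc : Int × Int) :
    ws.foldl (pvInnerA cs (cs.length : Int) (i : Int)) (PySem.List.pySetD dp (i : Int) bc)
      = PySem.List.pySetD dp (i : Int) (pvHfold cs i (ws.map (·.1)) bc) := by
  induction ws generalizing bc with
  | nil =>
    simp only [List.foldl_nil, List.map_nil]
    rw [pvHfold]
  | cons wd ws ih =>
    simp only [List.foldl_cons, List.map_cons]
    rw [inner_rel_one cs i hi dp hlen hdp bc wd (hws wd (by simp))]
    rw [ih (fun w' hw' => hws w' (by simp [hw'])) _]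
    congr 1
    conv_rhs => rw [pvHfold]
    congr 1
    by_cases hsw : PySem.Chars.startswith (cs.drop i) wd.1 = true
    · rw [if_pos hsw, dif_pos ⟨hws wd (by simp), hsw⟩]
    · rw [if_neg hsw, dif_neg (fun hc => hsw hc.2)]

theorem stepA_eq (cs : List Char) (i : Nat) (hi : i < cs.length)
    (dp : List (Int × Int)) (hlen : dp.length = cs.length + 1)
    (hdp : ∀ j : Nat, i < j → j ≤ cs.length → PySem.List.pyGetD dp (j : Int) (0, 0) = pvH cs j) :
    pvStepA cs (cs.length : Int) dp (i : Int) = PySem.List.pySetD dp (i : Int) (pvH cs i) := by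
  unfold pvStepA
  have hbase : PySem.List.pyGetD dp ((i : Int) + 1) (0, 0) = pvH cs (i + 1) := by
    have hc : (i : Int) + 1 = ((i + 1 : Nat) : Int) := by push_cast; ring
    rw [hc]
    exact hdp (i + 1) (by omega) (by omega)
  rw [hbase]
  rw [innerA_fold cs i hi dp hlen hdp pvWordsA wordsA_pos _]
  rw [wordsA_map_fst]
  congr 1
  conv_rhs => rw [pvH]
  rw [dif_pos hi]

theorem loopA (cs : List Char) : ∀ (t : Nat), t ≤ cs.length →
    ∀ dp : List (Int × Int), dp.length = cs.length + 1 →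
    (∀ j : Nat, t ≤ j → j ≤ cs.length → PySem.List.pyGetD dp (j : Int) (0, 0) = pvH cs j) →
    ∀ j : Nat, j ≤ cs.length →
      PySem.List.pyGetD ((PySem.List.pyRange ((t : Int) - 1) (-1) (-1)).foldl
          (pvStepA cs (cs.length : Int)) dp) (j : Int) (0, 0) = pvH cs j := by
  intro t
  induction t with
  | zero =>
    intro _ dp _ hdp j hj
    rw [PySem.List.pyRange_neg_one_eq_nil (by norm_num)]
    exact hdp j (Nat.zero_le _) hj
  | succ t ih =>
    intro ht dp hlen hdp j hj
    have hcons : PySem.List.pyRange (((t + 1 : Nat) : Int) - 1) (-1) (-1)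
        = (t : Int) :: PySem.List.pyRange ((t : Int) - 1) (-1) (-1) := by
      have hc : (((t + 1 : Nat) : Int) - 1) = (t : Int) := by push_cast; ring
      rw [hc, PySem.List.pyRange_neg_one_cons (by omega)]
    rw [hcons, List.foldl_cons]
    have hstep := stepA_eq cs t (by omega) dp hlen (fun j' h1 h2 => hdp j' (by omega) h2)
    refine ih (by omega) _ (by rw [hstep]; simp [hlen]) ?_ j hj
    intro j' h1 h2
    rw [hstep]
    simp only [PySem.List.pySetD_natCast, PySem.List.pyGetD_natCast]
    by_cases hjt : j' = t
    · subst hjt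
      rw [List.getD, List.getElem?_set_self (by omega)]
      rfl
    · rw [List.getD, List.getElem?_set_ne (by omega)]
      have h3 := hdp j' (by omega) h2
      rw [PySem.List.pyGetD_natCast, List.getD] at h3
      exact h3

theorem A_eq_pvH (s : String) : find_shortest_string_and_count s = pvH s.toList 0 := by
  unfold find_shortest_string_and_count
  simp only []
  have hinv : ∀ j : Nat, s.toList.length ≤ j → j ≤ s.toList.length →
      PySem.List.pyGetD (PySem.List.pySetD (List.replicate (s.toList.length + 1) ((0 : Int), (0 : Int)))
        (s.toList.length : Int) (0, 1)) (j : Int) (0, 0) = pvH s.toList j := by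
    intro j h1 h2
    have hj : j = s.toList.length := by omega
    subst hj
    simp only [PySem.List.pySetD_natCast, PySem.List.pyGetD_natCast]
    rw [List.getD, List.getElem?_set_self (by simp)]
    rw [pvH, dif_neg (by omega)]
    rfl
  have := loopA s.toList s.toList.length (le_refl _) _
    (by simp) hinv 0 (Nat.zero_le _)
  simpa using this

-- ---- B-side loop characterization: g[j] = pvG M j ----
theorem scan_eq (M : List (Int × Int)) (b : Int) :
    ∀ (fuel k : Nat), M.length ≤ k + fuel →
      pvScan M (M.length : Int) b (k : Int) fuel = ((pvNext M b k : Nat) : Int) := by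
  intro fuel
  induction fuel with
  | zero =>
    intro k hk
    unfold pvScan pvNext
    rw [List.drop_eq_nil_of_le (by omega)]
    simp
  | succ fuel ih =>
    intro k hk
    rw [pvScan]
    by_cases hkm : k < M.length
    · have hget : PySem.List.pyGetD M (k : Int) (0, 0) = M[k] := by
        rw [PySem.List.pyGetD_natCast]
        exact List.getD_eq_getElem _ _ hkm
      have hdrop : M.drop k = M[k] :: M.drop (k + 1) := List.drop_eq_getElem_cons hkm
      by_cases hb : (M[k] : Int × Int).1 < b
      · rw [if_pos ⟨by exact_mod_cast hkm, by rw [hget]; exact hb⟩]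
        have : (k : Int) + 1 = ((k + 1 : Nat) : Int) := by push_cast; ring
        rw [this, ih (k + 1) (by omega)]
        unfold pvNext
        rw [hdrop, List.takeWhile_cons_of_pos (by simpa using hb)]
        simp only [List.length_cons]
        push_cast
        ring
      · rw [if_neg (fun hc => hb (by rw [← hget]; exact hc.2))]
        unfold pvNext
        rw [hdrop, List.takeWhile_cons_of_neg (by simpa using hb)]
        simp
    · rw [if_neg (fun hc => hkm (by exact_mod_cast hc.1))]
      unfold pvNext
      rw [List.drop_eq_nil_of_le (by omega)]
      simp

theorem pvNext_le (M : List (Int × Int)) (b : Int) (j : Nat) (hj : j ≤ M.length) :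
    pvNext M b j ≤ M.length := by
  have h1 : ((M.drop j).takeWhile (fun p => decide (p.1 < b))).length ≤ (M.drop j).length :=
    ((M.drop j).takeWhile_sublist _).length_le
  rw [List.length_drop] at h1
  unfold pvNext; omega

theorem stepB_eq (M : List (Int × Int)) (j : Nat) (hj : j < M.length)
    (g : List (Int × Int)) (hlen : g.length = M.length + 1)
    (hg : ∀ j' : Nat, j < j' → j' ≤ M.length → PySem.List.pyGetD g (j' : Int) (0, 0) = pvG M j') :
    pvStepB M (M.length : Int) g (j : Int) = PySem.List.pySetD g (j : Int) (pvG M j) := by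
  unfold pvStepB
  simp only []
  have hse : PySem.List.pyGetD M (j : Int) (0, 0) = M.getD j (0, 0) := PySem.List.pyGetD_natCast _ _ _
  have hc : (j : Int) + 1 = ((j + 1 : Nat) : Int) := by push_cast; ring
  rw [hse, hc, scan_eq M (M.getD j (0, 0)).2 M.length (j + 1) (by omega)]
  have hskip : PySem.List.pyGetD g ((j + 1 : Nat) : Int) (0, 0) = pvG M (j + 1) :=
    hg (j + 1) (by omega) (by omega)
  have hkg : PySem.List.pyGetD g ((pvNext M (M.getD j (0, 0)).2 (j + 1) : Nat) : Int) (0, 0)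
      = pvG M (pvNext M (M.getD j (0, 0)).2 (j + 1)) :=
    hg _ (by have := Nat.le_add_right (j + 1) 0; unfold pvNext; omega)
      (pvNext_le M _ (j + 1) (by omega))
  rw [hskip, hkg]
  conv_rhs => rw [pvG]
  rw [dif_pos hj]
  simp only []
  split_ifs <;> rfl

theorem loopB (M : List (Int × Int)) : ∀ (t : Nat), t ≤ M.length →
    ∀ g : List (Int × Int), g.length = M.length + 1 →
    (∀ j : Nat, t ≤ j → j ≤ M.length → PySem.List.pyGetD g (j : Int) (0, 0) = pvG M j) →
    ∀ j : Nat, j ≤ M.length →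
      PySem.List.pyGetD ((PySem.List.pyRange ((t : Int) - 1) (-1) (-1)).foldl
          (pvStepB M (M.length : Int)) g) (j : Int) (0, 0) = pvG M j := by
  intro t
  induction t with
  | zero =>
    intro _ g _ hg j hj
    rw [PySem.List.pyRange_neg_one_eq_nil (by norm_num)]
    exact hg j (Nat.zero_le _) hj
  | succ t ih =>
    intro ht g hlen hg j hj
    have hcons : PySem.List.pyRange (((t + 1 : Nat) : Int) - 1) (-1) (-1)
        = (t : Int) :: PySem.List.pyRange ((t : Int) - 1) (-1) (-1) := by
      have hc : (((t + 1 : Nat) : Int) - 1) = (t : Int) := by push_cast; ring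
      rw [hc, PySem.List.pyRange_neg_one_cons (by omega)]
    rw [hcons, List.foldl_cons]
    have hstep := stepB_eq M t (by omega) g hlen (fun j' h1 h2 => hg j' (by omega) h2)
    refine ih (by omega) _ (by rw [hstep]; simp [hlen]) ?_ j hj
    intro j' h1 h2
    rw [hstep]
    simp only [PySem.List.pySetD_natCast, PySem.List.pyGetD_natCast]
    by_cases hjt : j' = t
    · subst hjt
      rw [List.getD, List.getElem?_set_self (by omega)]
      rfl
    · rw [List.getD, List.getElem?_set_ne (by omega)]
      have h3 := hg j' (by omega) h2
      rw [PySem.List.pyGetD_natCast, List.getD] at h3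
      exact h3

theorem B_eq_pvG (s : String) : find_shortest_string_and_count_alt s
    = ((s.toList.length : Int) - (pvG (pvMatches s.toList) 0).1, (pvG (pvMatches s.toList) 0).2) := by
  unfold find_shortest_string_and_count_alt
  simp only []
  have hinv : ∀ j : Nat, (pvMatches s.toList).length ≤ j → j ≤ (pvMatches s.toList).length →
      PySem.List.pyGetD (List.replicate ((pvMatches s.toList).length + 1) ((0 : Int), (1 : Int)))
        (j : Int) (0, 0) = pvG (pvMatches s.toList) j := by
    intro j h1 h2
    have hj : j = (pvMatches s.toList).length := by omega
    subst hj
    rw [PySem.List.pyGetD_natCast, List.getD, List.getElem?_replicate_of_lt (by omega)]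
    rw [pvG, dif_neg (by omega)]
    rfl
  have hmain := loopB (pvMatches s.toList) (pvMatches s.toList).length (le_refl _) _
    (by simp) hinv 0 (Nat.zero_le _)
  simp only [Nat.cast_zero] at hmain
  rw [hmain]

-- ---- the match list: membership, sortedness ----
theorem filterMap_single {α β : Type} (l : List α) (f : α → Option β) (x : α) (y : β)
    (hx : x ∈ l) (hnd : l.Nodup) (hfx : f x = some y) (hother : ∀ z ∈ l, z ≠ x → f z = none) :
    l.filterMap f = [y] := by
  induction l with
  | nil => exact absurd hx (by simp)
  | cons a l ih =>
    rcases List.nodup_cons.mp hnd with ⟨ha_nin, hnd'⟩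
    by_cases hax : a = x
    · subst hax
      rw [List.filterMap_cons_some hfx]
      have hnil : l.filterMap f = [] :=
        List.filterMap_eq_nil_iff.mpr (fun z hz => hother z (by simp [hz]) (fun he => ha_nin (he ▸ hz)))
      rw [hnil]
    · have hx' : x ∈ l := by
        rcases List.mem_cons.mp hx with h | h
        · exact absurd h.symm hax
        · exact h
      rw [List.filterMap_cons_none (hother a (by simp) hax)]
      exact ih hx' hnd' (fun z hz => hother z (by simp [hz]))

theorem cands_cases (cs : List Char) (i : Nat) :
    (pvWordsB.filterMap (fun w =>
        if PySem.List.slice cs (some (i : Int)) (some ((i : Int) + (w.length : Int))) = w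
        then some ((i : Int), (i : Int) + (w.length : Int)) else none) = []
      ∧ ∀ w ∈ pvWordsB, ¬ PySem.Chars.startswith (cs.drop i) w = true)
    ∨ (∃ w ∈ pvWordsB, PySem.Chars.startswith (cs.drop i) w = true ∧
        pvWordsB.filterMap (fun w =>
          if PySem.List.slice cs (some (i : Int)) (some ((i : Int) + (w.length : Int))) = w
          then some ((i : Int), (i : Int) + (w.length : Int)) else none)
          = [((i : Int), (i : Int) + (w.length : Int))]) := by
  by_cases hex : ∃ w, w ∈ pvWordsB ∧ PySem.Chars.startswith (cs.drop i) w = true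
  · right
    obtain ⟨w0, hw0, hsw0⟩ := hex
    refine ⟨w0, hw0, hsw0, ?_⟩
    refine filterMap_single _ _ w0 _ hw0 wordsB_nodup ?_ ?_
    · rw [if_pos ((sliceB_iff cs w0 i).mpr hsw0)]
    · intro z hz hne
      rw [if_neg (fun hg => hne (match_unique _ z w0 hz hw0 ((sliceB_iff cs z i).mp hg) hsw0))]
  · left
    refine ⟨List.filterMap_eq_nil_iff.mpr (fun w hw => ?_), fun w hw hsw => hex ⟨w, hw, hsw⟩⟩
    rw [if_neg (fun hg => hex ⟨w, hw, (sliceB_iff cs w i).mp hg⟩)]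

theorem mem_matches (cs : List Char) (p : Int × Int) :
    p ∈ pvMatches cs ↔ ∃ i : Nat, i < cs.length ∧ ∃ w ∈ pvWordsB,
      PySem.Chars.startswith (cs.drop i) w = true ∧ p = ((i : Int), (i : Int) + (w.length : Int)) := by
  unfold pvMatches
  rw [List.mem_flatMap]
  constructor
  · rintro ⟨x, hx, hp⟩
    rw [PySem.List.mem_pyRange_one] at hx
    obtain ⟨i, rfl⟩ : ∃ i : Nat, x = (i : Int) := ⟨x.toNat, (Int.toNat_of_nonneg hx.1).symm⟩
    rcases List.mem_filterMap.mp hp with ⟨w, hw, hfw⟩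
    by_cases hg : PySem.List.slice cs (some (i : Int)) (some ((i : Int) + (w.length : Int))) = w
    · rw [if_pos hg] at hfw
      refine ⟨i, by exact_mod_cast hx.2, w, hw, (sliceB_iff cs w i).mp hg, ?_⟩
      exact (Option.some_inj.mp hfw).symm
    · rw [if_neg hg] at hfw
      exact absurd hfw (by simp)
  · rintro ⟨i, hi, w, hw, hsw, rfl⟩
    refine ⟨(i : Int), ?_, ?_⟩
    · rw [PySem.List.mem_pyRange_one]
      constructor
      · positivity
      · exact_mod_cast hi
    · exact List.mem_filterMap.mpr ⟨w, hw, by rw [if_pos ((sliceB_iff cs w i).mpr hsw)]⟩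

theorem cand_fst (cs : List Char) (a : Int) (x : Int × Int)
    (hx : x ∈ pvWordsB.filterMap (fun w =>
      if PySem.List.slice cs (some a) (some (a + (w.length : Int))) = w
      then some (a, a + (w.length : Int)) else none)) : x.1 = a := by
  rcases List.mem_filterMap.mp hx with ⟨w, -, hfw⟩
  by_cases hg : PySem.List.slice cs (some a) (some (a + (w.length : Int))) = w
  · rw [if_pos hg] at hfw
    rw [← Option.some_inj.mp hfw]
  · rw [if_neg hg] at hfw
    exact absurd hfw (by simp)

theorem sorted_matches (cs : List Char) : (pvMatches cs).Pairwise (fun p q => p.1 < q.1) := by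
  unfold pvMatches
  rw [List.pairwise_flatMap]
  constructor
  · intro a ha
    rw [PySem.List.mem_pyRange_one] at ha
    obtain ⟨i, rfl⟩ : ∃ i : Nat, a = (i : Int) := ⟨a.toNat, (Int.toNat_of_nonneg ha.1).symm⟩
    rcases cands_cases cs i with ⟨hnil, -⟩ | ⟨w, -, -, hone⟩
    · rw [hnil]
      exact List.Pairwise.nil
    · rw [hone]
      exact List.pairwise_singleton _ _
  · refine List.Pairwise.imp ?_ (PySem.List.pairwise_lt_pyRange_one (a := 0) (b := (cs.length : Int)))
    intro a b hab x hx y hy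
    rw [cand_fst cs a x hx, cand_fst cs b y hy]
    exact hab

-- ---- counting lemmas on a strictly sorted match list ----
theorem takeWhile_len_count (M : List (Int × Int)) (hs : M.Pairwise (fun p q => p.1 < q.1))
    (b : Int) : ((M.takeWhile (fun p => decide (p.1 < b))).length = M.countP (fun p => decide (p.1 < b))) := by
  induction M with
  | nil => rfl
  | cons x M ih =>
    rcases List.pairwise_cons.mp hs with ⟨hx, hs'⟩
    by_cases hb : x.1 < b
    · rw [List.takeWhile_cons_of_pos (by simpa using hb),
        List.countP_cons_of_pos (by simpa using hb), List.length_cons, ih hs']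
    · rw [List.takeWhile_cons_of_neg (by simpa using hb),
        List.countP_cons_of_neg (by simpa using hb)]
      simp only [List.length_nil]
      symm
      refine List.countP_eq_zero.mpr (fun p hp => by simpa using (by have := hx p hp; omega : ¬ p.1 < b))

theorem next_fidx (M : List (Int × Int)) (hs : M.Pairwise (fun p q => p.1 < q.1))
    (a b : Int) (hab : a ≤ b) : pvNext M b (pvFIdx M a) = pvFIdx M b := by
  unfold pvNext pvFIdx
  induction M with
  | nil => rfl
  | cons x M ih =>
    rcases List.pairwise_cons.mp hs with ⟨hx, hs'⟩
    by_cases ha : x.1 < a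
    · rw [List.countP_cons_of_pos (by simpa using ha),
        List.countP_cons_of_pos (by simpa using (by omega : x.1 < b))]
      rw [List.drop_succ_cons]
      have := ih hs'
      omega
    · have hca : List.countP (fun p => decide (p.1 < a)) M = 0 :=
        List.countP_eq_zero.mpr (fun p hp => by simpa using (by have := hx p hp; omega : ¬ p.1 < a))
      rw [List.countP_cons_of_neg (by simpa using ha), hca]
      simp only [List.drop_zero]
      by_cases hbx : x.1 < b
      · rw [List.takeWhile_cons_of_pos (by simpa using hbx),
          List.countP_cons_of_pos (by simpa using hbx), List.length_cons,
          takeWhile_len_count M hs' b]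
        omega
      · rw [List.takeWhile_cons_of_neg (by simpa using hbx),
          List.countP_cons_of_neg (by simpa using hbx)]
        have : List.countP (fun p => decide (p.1 < b)) M = 0 :=
          List.countP_eq_zero.mpr (fun p hp => by simpa using (by have := hx p hp; omega : ¬ p.1 < b))
        simp [this]

theorem elem_at_fidx (M : List (Int × Int)) (hs : M.Pairwise (fun p q => p.1 < q.1))
    (x : Int × Int) (hx : x ∈ M) : M[pvFIdx M x.1]? = some x := by
  unfold pvFIdx
  induction M with
  | nil => exact absurd hx (by simp)
  | cons y M ih =>
    rcases List.pairwise_cons.mp hs with ⟨hy, hs'⟩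
    by_cases hey : y = x
    · subst hey
      have h0 : List.countP (fun p => decide (p.1 < y.1)) (y :: M) = 0 :=
        List.countP_eq_zero.mpr (by
          intro p hp
          rcases List.mem_cons.mp hp with rfl | hp
          · simp
          · simpa using (by have := hy p hp; omega : ¬ p.1 < y.1))
      rw [h0]
      rfl
    · have hx' : x ∈ M := by
        rcases List.mem_cons.mp hx with h | h
        · exact absurd h.symm hey
        · exact h
      rw [List.countP_cons_of_pos (by simpa using hy x hx')]
      simpa using ih hs' hx'

theorem fidx_succ (M : List (Int × Int)) (hs : M.Pairwise (fun p q => p.1 < q.1))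
    (x : Int × Int) (hx : x ∈ M) : pvFIdx M (x.1 + 1) = pvFIdx M x.1 + 1 := by
  unfold pvFIdx
  induction M with
  | nil => exact absurd hx (by simp)
  | cons y M ih =>
    rcases List.pairwise_cons.mp hs with ⟨hy, hs'⟩
    by_cases hey : y = x
    · subst hey
      have h0 : List.countP (fun p => decide (p.1 < y.1)) (y :: M) = 0 :=
        List.countP_eq_zero.mpr (by
          intro p hp
          rcases List.mem_cons.mp hp with rfl | hp
          · simp
          · simpa using (by have := hy p hp; omega : ¬ p.1 < y.1))
      have h1 : List.countP (fun p => decide (p.1 < y.1 + 1)) M = 0 :=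
        List.countP_eq_zero.mpr (fun p hp => by simpa using (by have := hy p hp; omega : ¬ p.1 < y.1 + 1))
      rw [h0, List.countP_cons_of_pos (by simp), h1]
    · have hx' : x ∈ M := by
        rcases List.mem_cons.mp hx with h | h
        · exact absurd h.symm hey
        · exact h
      have hlt : y.1 < x.1 := hy x hx'
      rw [List.countP_cons_of_pos (by simpa using (by omega : y.1 < x.1 + 1)),
        List.countP_cons_of_pos (by simpa using hlt), ih hs' hx']

theorem fidx_congr (M : List (Int × Int)) (i : Int) (h : ∀ p ∈ M, p.1 ≠ i) :
    pvFIdx M (i + 1) = pvFIdx M i := by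
  unfold pvFIdx
  refine List.countP_congr (fun p hp => ?_)
  simp only [decide_eq_true_eq]
  have := h p hp
  omega

-- ---- the inner fold of pvH, when no word / exactly one word matches ----
theorem pvHfold_none (cs : List Char) (i : Nat) (ws : List (List Char)) (bc : Int × Int)
    (h : ∀ w ∈ ws, ¬ PySem.Chars.startswith (cs.drop i) w = true) :
    pvHfold cs i ws bc = bc := by
  induction ws with
  | nil => rw [pvHfold]
  | cons w ws ih =>
    rw [pvHfold, dif_neg (fun hc => h w (by simp) hc.2)]
    exact ih (fun w' hw' => h w' (by simp [hw']))

theorem pvHfold_one (cs : List Char) (i : Nat) (ws : List (List Char)) (bc : Int × Int)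
    (w0 : List Char) (hmem : w0 ∈ ws) (hnd : ws.Nodup) (hpos : ∀ w ∈ ws, 0 < w.length)
    (hw0 : PySem.Chars.startswith (cs.drop i) w0 = true)
    (honly : ∀ w ∈ ws, PySem.Chars.startswith (cs.drop i) w = true → w = w0) :
    pvHfold cs i ws bc = pvComb bc ((pvH cs (i + w0.length)).1 + 1, (pvH cs (i + w0.length)).2) := by
  induction ws generalizing bc with
  | nil => exact absurd hmem (by simp)
  | cons w ws ih =>
    rcases List.nodup_cons.mp hnd with ⟨hw_nin, hnd'⟩
    by_cases hew : w = w0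
    · subst hew
      rw [pvHfold, dif_pos ⟨hpos w (by simp), hw0⟩]
      refine pvHfold_none cs i ws _ (fun w' hw' hsw' => ?_)
      exact hw_nin ((honly w' (by simp [hw']) hsw') ▸ hw')
    · have hmem' : w0 ∈ ws := by
        rcases List.mem_cons.mp hmem with h | h
        · exact absurd h.symm hew
        · exact h
      rw [pvHfold, dif_neg (fun hc => hew (honly w (by simp) hc.2))]
      exact ih _ hmem' hnd' (fun w' hw' => hpos w' (by simp [hw']))
        (fun w' hw' hsw' => honly w' (by simp [hw']) hsw')

-- ---- the core: A's per-position DP equals B's interval-scheduling DP ----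
-- A's combine of the carry-forward pair with a matched word's candidate, in terms of
-- savings: lengths n-·-· compare in the reversed order of the savings
theorem comb_arith (n i L S1 S2 T1 T2 : Int) :
    pvComb (n - (i + 1) - S1 + 1, S2) (n - (i + L) - T1 + 1, T2)
      = (n - i - (if L - 1 + T1 > S1 then (L - 1 + T1, T2)
                  else if L - 1 + T1 = S1 then (S1, S2 + T2) else (S1, S2)).1,
         (if L - 1 + T1 > S1 then (L - 1 + T1, T2)
          else if L - 1 + T1 = S1 then (S1, S2 + T2) else (S1, S2)).2) := by
  unfold pvComb
  dsimp only
  split_ifs <;> rw [Prod.mk.injEq] <;> constructor <;> omega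

-- the value at the right end: empty suffix, all matches exhausted
theorem core_top (cs : List Char) :
    pvH cs cs.length = ((cs.length : Int) - (cs.length : Int)
      - (pvG (pvMatches cs) (pvFIdx (pvMatches cs) (cs.length : Int))).1,
      (pvG (pvMatches cs) (pvFIdx (pvMatches cs) (cs.length : Int))).2) := by
  have hfull : pvFIdx (pvMatches cs) (cs.length : Int) = (pvMatches cs).length := by
    refine List.countP_eq_length.mpr (fun p hp => ?_)
    rcases (mem_matches cs p).mp hp with ⟨i0, hi0, w, hw, hsw, rfl⟩
    simpa using (by exact_mod_cast hi0 : ((i0 : Nat) : Int) < (cs.length : Int))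
  rw [pvH, dif_neg (by omega), hfull, pvG, dif_neg (by omega)]
  simp
theorem core (cs : List Char) : ∀ (k i : Nat), cs.length - i ≤ k → i ≤ cs.length →
    pvH cs i = ((cs.length : Int) - (i : Int) - (pvG (pvMatches cs) (pvFIdx (pvMatches cs) (i : Int))).1,
                (pvG (pvMatches cs) (pvFIdx (pvMatches cs) (i : Int))).2) := by
  intro k
  induction k with
  | zero =>
    intro i hk hi
    have hi' : i = cs.length := by omega
    subst hi'
    exact core_top cs
  | succ k ih =>
    intro i hk hi
    rcases Nat.lt_or_ge i cs.length with hlt | hge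
    swap
    · have hi' : i = cs.length := by omega
      subst hi'
      exact core_top cs
    · have hs := sorted_matches cs
      rw [pvH, dif_pos hlt]
      rcases cands_cases cs i with ⟨hnil, hnone⟩ | ⟨w0, hw0, hsw0, hone⟩
      · -- no digit word matches at position i
        rw [pvHfold_none cs i pvWordsB _ (fun w hw => hnone w hw)]
        have hno : ∀ p ∈ pvMatches cs, p.1 ≠ (i : Int) := by
          intro p hp he
          rcases (mem_matches cs p).mp hp with ⟨i0, hi0, w, hw, hsw, rfl⟩
          have he' : ((i0 : Nat) : Int) = (i : Int) := he
          have : i0 = i := by exact_mod_cast he'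
          subst this
          exact hnone w hw hsw
        rw [ih (i + 1) (by omega) (by omega)]
        have hc1 : ((i + 1 : Nat) : Int) = (i : Int) + 1 := by push_cast; ring
        rw [hc1, fidx_congr (pvMatches cs) (i : Int) hno]
        dsimp only
        rw [Prod.mk.injEq]
        exact ⟨by ring, rfl⟩
      · -- exactly the word w0 matches at position i
        have hLpos : 0 < w0.length := wordsB_pos w0 hw0
        have hfit : i + w0.length ≤ cs.length := by
          have := ((PySem.Chars.startswith_iff _ _).mp hsw0).length_le
          rw [List.length_drop] at this
          omega
        rw [pvHfold_one cs i pvWordsB _ w0 hw0 wordsB_nodup wordsB_pos hsw0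
          (fun w hw hsw => match_unique _ w w0 hw hw0 hsw hsw0)]
        set M := pvMatches cs with hM
        have hx_mem : ((i : Int), (i : Int) + (w0.length : Int)) ∈ M :=
          (mem_matches cs _).mpr ⟨i, hlt, w0, hw0, hsw0, rfl⟩
        set j0 := pvFIdx M (i : Int) with hj0
        have hj0get : M[j0]? = some ((i : Int), (i : Int) + (w0.length : Int)) :=
          elem_at_fidx M hs _ hx_mem
        obtain ⟨hj0lt, hj0elem⟩ := List.getElem?_eq_some_iff.mp hj0get
        have hse : M.getD j0 (0, 0) = ((i : Int), (i : Int) + (w0.length : Int)) := by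
          rw [List.getD, hj0get]
          rfl
        have hsucc : pvFIdx M ((i : Int) + 1) = j0 + 1 :=
          fidx_succ M hs _ hx_mem
        have hnext : pvNext M ((i : Int) + (w0.length : Int)) (j0 + 1)
            = pvFIdx M ((i : Int) + (w0.length : Int)) := by
          rw [← hsucc]
          refine next_fidx M hs _ _ ?_
          have h1 : (1 : Int) ≤ (w0.length : Int) := by exact_mod_cast hLpos
          omega
        -- expand pvG at j0
        have hG : pvG M j0 =
            (if (w0.length : Int) - 1 + (pvG M (pvFIdx M ((i : Int) + (w0.length : Int)))).1
                  > (pvG M (j0 + 1)).1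
             then ((w0.length : Int) - 1 + (pvG M (pvFIdx M ((i : Int) + (w0.length : Int)))).1,
                   (pvG M (pvFIdx M ((i : Int) + (w0.length : Int)))).2)
             else if (w0.length : Int) - 1 + (pvG M (pvFIdx M ((i : Int) + (w0.length : Int)))).1
                  = (pvG M (j0 + 1)).1
             then ((pvG M (j0 + 1)).1, (pvG M (j0 + 1)).2
                  + (pvG M (pvFIdx M ((i : Int) + (w0.length : Int)))).2)
             else ((pvG M (j0 + 1)).1, (pvG M (j0 + 1)).2)) := by
          conv_lhs => rw [pvG]
          rw [dif_pos hj0lt]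
          simp only [hse, hnext]
          have harith : ((i : Int) + (w0.length : Int)) - (i : Int) - 1 = (w0.length : Int) - 1 := by
            ring
          simp only [harith]
        rw [ih (i + 1) (by omega) (by omega), ih (i + w0.length) (by omega) (by omega)]
        simp only []
        have hc1 : ((i + 1 : Nat) : Int) = (i : Int) + 1 := by push_cast; ring
        have hc2 : ((i + w0.length : Nat) : Int) = (i : Int) + (w0.length : Int) := by push_cast; ring
        rw [hc1, hc2, hsucc, hG]
        exact comb_arith (cs.length : Int) (i : Int) (w0.length : Int)
          (pvG M (j0 + 1)).1 (pvG M (j0 + 1)).2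
          (pvG M (pvFIdx M ((i : Int) + (w0.length : Int)))).1
          (pvG M (pvFIdx M ((i : Int) + (w0.length : Int)))).2

theorem fidx_zero (cs : List Char) : pvFIdx (pvMatches cs) 0 = 0 := by
  refine List.countP_eq_zero.mpr (fun p hp => ?_)
  rcases (mem_matches cs p).mp hp with ⟨i, hi, w, hw, hsw, rfl⟩
  simp

-- ===== VERDICT (by name: the statement is the Claim_ definition above) =====
theorem find_shortest_string_and_count_spec : Claim_equal_find_shortest_string_and_count := by
  intro s _
  unfold Spec_find_shortest_string_and_count
  rw [A_eq_pvH, B_eq_pvG]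
  rw [core s.toList (s.toList.length - 0) 0 (le_refl _) (Nat.zero_le _)]
  have h0 : ((0 : Nat) : Int) = (0 : Int) := rfl
  rw [h0, fidx_zero]
  simp
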